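-- pv_equiv track=rewrite | github.com/markuswondrak/AgentMux | agentmux/sessions/state_store.py | parse_review_verdict
-- ===== SOURCE A (Python) =====
-- def parse_review_verdict(review_text: str) -> str | None:
--     for line in review_text.splitlines():
--         normalized = line.strip().lower()
--         if not normalized:
--             continue
--         if normalized == "verdict: pass":
--             return "pass"
--         if normalized == "verdict: fail":
--             return "fail"
--         return None
--     return None
-- ===== SOURCE B (Python) =====
-- def parse_review_verdict(review_text: str) -> str | None:
--     # Character-level: lowercase the whole text, strip leading whitespace (this
--     # skips any blank lines), cut the remaining text at the first line break,
--     # trim its tail and classify the resulting first line.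
--     t = review_text.lower().lstrip()
--     i = 0
--     while i < len(t) and t[i] not in "\r\n":
--         i += 1
--     first = t[:i].rstrip()
--     if first == "verdict: pass":
--         return "pass"
--     if first == "verdict: fail":
--         return "fail"
--     return None
-- ===== Notes on version B (the rewrite author's own statement) =====
-- stated objective: alternative
-- what changed: Replaces the split-into-lines loop (strip/lower per line, embedded returns) by a character-level scan: lowercase the whole text once, lstrip it (which skips blank lines), cut at the first line break, rstrip and classify that single first line.
import Mathlib
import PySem

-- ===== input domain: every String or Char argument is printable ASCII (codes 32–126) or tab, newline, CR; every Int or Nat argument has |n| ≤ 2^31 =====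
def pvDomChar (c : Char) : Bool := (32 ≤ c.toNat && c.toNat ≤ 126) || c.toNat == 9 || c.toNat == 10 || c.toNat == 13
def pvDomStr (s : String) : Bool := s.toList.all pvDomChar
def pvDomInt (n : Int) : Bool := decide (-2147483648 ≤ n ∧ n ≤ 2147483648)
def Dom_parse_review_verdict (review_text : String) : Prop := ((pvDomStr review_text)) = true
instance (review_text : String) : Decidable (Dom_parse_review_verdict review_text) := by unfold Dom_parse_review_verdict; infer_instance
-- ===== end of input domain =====

-- B replaces A's split-into-lines loop by a character-level scan of the whole text
-- (lowercase once, lstrip to skip blank lines, cut at the first line break, rstrip, classify).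

-- ===== PORT A =====
-- the 'for line in review_text.splitlines()' loop with embedded returns
def pvLoopA : List (List Char) → Option String
  | [] => none
  | line :: rest =>
    let normalized := PySem.Chars.lower (PySem.Chars.strip line)
    if normalized = [] then pvLoopA rest
    else if normalized = "verdict: pass".toList then some "pass"
    else if normalized = "verdict: fail".toList then some "fail"
    else none

def parse_review_verdict (review_text : String) : Option String :=
  pvLoopA (PySem.Chars.splitlines review_text.toList)

-- ===== PORT B =====
-- the 'while i < len(t) and t[i] not in "\r\n": i += 1' loop followed by the slice t[:i]
def pvTakeLine : List Char → List Char
  | [] => []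
  | c :: rest => if c = '\r' ∨ c = '\n' then [] else c :: pvTakeLine rest

-- the final if/if/return-None classification of Source B
def pvClassify (first : List Char) : Option String :=
  if first = "verdict: pass".toList then some "pass"
  else if first = "verdict: fail".toList then some "fail"
  else none

def parse_review_verdict_alt (review_text : String) : Option String :=
  pvClassify (PySem.Chars.rstrip (pvTakeLine (PySem.Chars.lstrip (PySem.Chars.lower review_text.toList))))

-- ===== PRECONDITION & SPEC =====
def Spec_parse_review_verdict (review_text : String) (out : Option String) : Prop := out = parse_review_verdict_alt review_text
instance (review_text : String) (out : Option String) : Decidable (Spec_parse_review_verdict review_text out) := by unfold Spec_parse_review_verdict; infer_instance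

-- ===== CLAIM (what is proved, stated in full; the proofs are below) =====
def Claim_equal_parse_review_verdict : Prop := ∀ (review_text : String), Dom_parse_review_verdict review_text → Spec_parse_review_verdict review_text (parse_review_verdict review_text)

-- ===== LEMMAS AND PROOFS =====

-- the line-break predicate splitlines uses (the inlined `have isB` of PySem.Chars.splitlines)
def pvB (c : Char) : Bool :=
  have n := c.toNat
  decide (n = 10) || decide (n = 13) || decide (n = 11) || decide (n = 12) || decide (n = 28) || decide (n = 29) ||
          decide (n = 30) ||
        decide (n = 133) ||
      decide (n = 8232) ||
    decide (n = 8233)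

theorem pv_splitlines_eq (l : List Char) :
    PySem.Chars.splitlines l = PySem.Chars.splitlines.go pvB l [] [] := rfl

theorem pv_toNat_inj (c d : Char) (h : c.toNat = d.toNat) : c = d := by
  apply Char.ext; apply UInt32.toNat_inj.mp; exact h

theorem pv_char_eq_iff (c d : Char) : (c = d) ↔ c.toNat = d.toNat :=
  ⟨fun e => by rw [e], pv_toNat_inj c d⟩

theorem pv_ofNat_toNat (n : Nat) (h : n < 55296) : (Char.ofNat n).toNat = n := by
  unfold Char.ofNat
  rw [dif_pos (Or.inl h : Nat.isValidChar n)]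
  simp [Char.ofNatAux, Char.toNat]

theorem pv_le_iff (c d : Char) : (c ≤ d) ↔ c.toNat ≤ d.toNat := by
  rw [Char.le_def, UInt32.le_iff_toNat_le]; rfl

theorem pv_lowerChar_toNat (c : Char) :
    (PySem.Chars.lowerChar c).toNat = if 65 ≤ c.toNat ∧ c.toNat ≤ 90 then c.toNat + 32 else c.toNat := by
  simp only [PySem.Chars.lowerChar, PySem.Chars.isupper, Bool.and_eq_true, decide_eq_true_eq, pv_le_iff]
  have hA : ('A' : Char).toNat = 65 := rfl
  have hZ : ('Z' : Char).toNat = 90 := rfl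
  split_ifs with h1 h2 h2
  · exact pv_ofNat_toNat _ (by omega)
  · omega
  · omega
  · rfl

-- a dom char is a line break for splitlines iff it is '\n' or '\r'
theorem pvB_dom (c : Char) (h : pvDomChar c = true) : pvB c = (decide (c = '\n') || decide (c = '\r')) := by
  simp only [pvDomChar, Bool.or_eq_true, Bool.and_eq_true, decide_eq_true_eq, beq_iff_eq] at h
  rw [Bool.eq_iff_iff]
  simp only [pvB, Bool.or_eq_true, decide_eq_true_eq, pv_char_eq_iff]
  have h1 : ('\n' : Char).toNat = 10 := rfl
  have h2 : ('\r' : Char).toNat = 13 := rfl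
  omega

theorem pv_isspace_toNat (c : Char) : PySem.Chars.isspace c =
    decide (c.toNat = 32 ∨ (9 ≤ c.toNat ∧ c.toNat ≤ 13) ∨ (28 ≤ c.toNat ∧ c.toNat ≤ 31) ∨ c.toNat = 133 ∨ c.toNat = 160 ∨
      c.toNat = 5760 ∨ (8192 ≤ c.toNat ∧ c.toNat ≤ 8202) ∨ c.toNat = 8232 ∨ c.toNat = 8233 ∨ c.toNat = 8239 ∨ c.toNat = 8287 ∨ c.toNat = 12288) := by
  rw [Bool.eq_iff_iff]
  simp only [PySem.Chars.isspace, Bool.or_eq_true, Bool.and_eq_true, decide_eq_true_eq]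
  omega

-- lowering preserves whitespace-ness
theorem pv_isspace_lower (c : Char) :
    PySem.Chars.isspace (PySem.Chars.lowerChar c) = PySem.Chars.isspace c := by
  rw [Bool.eq_iff_iff]
  simp only [pv_isspace_toNat, decide_eq_true_eq, pv_lowerChar_toNat]
  split_ifs with hu
  · omega
  · omega

-- lowering preserves being '\r' / '\n'
theorem pv_lower_break (c : Char) :
    ((PySem.Chars.lowerChar c = '\r') ∨ (PySem.Chars.lowerChar c = '\n')) ↔ ((c = '\r') ∨ (c = '\n')) := by
  have h1 : ('\n' : Char).toNat = 10 := rfl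
  have h2 : ('\r' : Char).toNat = 13 := rfl
  simp only [pv_char_eq_iff, pv_lowerChar_toNat, h1, h2]
  split_ifs with hu
  · omega
  · omega

-- in the domain, a line break is whitespace; whitespace is ' ', '\t', '\n' or '\r'
theorem pv_isspace_of_pvB (c : Char) (h : pvDomChar c = true) (hb : pvB c = true) :
    PySem.Chars.isspace c = true := by
  rw [pvB_dom c h] at hb
  simp only [Bool.or_eq_true, decide_eq_true_eq, pv_char_eq_iff] at hb
  rw [pv_isspace_toNat]
  simp only [decide_eq_true_eq]
  have h1 : ('\n' : Char).toNat = 10 := rfl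
  have h2 : ('\r' : Char).toNat = 13 := rfl
  omega

theorem pv_nonspace_pvB (c : Char) (h : pvDomChar c = true) (hs : PySem.Chars.isspace c = false) :
    pvB c = false := by
  cases hb : pvB c
  · rfl
  · rw [pv_isspace_of_pvB c h hb] at hs; cases hs

-- step equation for splitlines.go on a cons that is not the "\r\n" pair
theorem pv_go_cons (c : Char) (rest : List Char) (cur : List Char) (acc : List (List Char))
    (h2 : ¬(c = '\r' ∧ ∃ r, rest = '\n' :: r)) :
    PySem.Chars.splitlines.go pvB (c :: rest) cur acc =
      if pvB c = true then PySem.Chars.splitlines.go pvB rest [] (cur.reverse :: acc)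
      else PySem.Chars.splitlines.go pvB rest (c :: cur) acc := by
  rw [PySem.Chars.splitlines.go.eq_def]
  split
  · rename_i heq
    exact absurd heq (by simp)
  · rename_i r' heq
    injection heq with hc hr
    exact absurd ⟨hc, _, hr⟩ h2
  · rename_i c' r' hno heq
    injection heq with hc hr
    rw [← hc, ← hr]

theorem pv_go_crnl (rest : List Char) (cur : List Char) (acc : List (List Char)) :
    PySem.Chars.splitlines.go pvB ('\r' :: '\n' :: rest) cur acc =
      PySem.Chars.splitlines.go pvB rest [] (cur.reverse :: acc) := by
  rw [PySem.Chars.splitlines.go.eq_def]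
  split
  · rename_i heq
    exact absurd heq (by simp)
  · rename_i r' heq
    injection heq with hc hr
    injection hr with hd hr2
    rw [← hr2]
  · rename_i c' r' hno heq
    injection heq with hc hr
    exact absurd (hno _ hc.symm hr.symm) (fun x => x)

theorem pv_go_nil (cur : List Char) (acc : List (List Char)) :
    PySem.Chars.splitlines.go pvB [] cur acc =
      if cur = [] then acc.reverse else acc.reverse ++ [cur.reverse] := by
  rw [PySem.Chars.splitlines.go.eq_def]
  simp

-- accumulator lemma for splitlines.go
theorem pv_go_acc : ∀ (n : Nat) (l : List Char), l.length ≤ n → ∀ cur acc,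
    PySem.Chars.splitlines.go pvB l cur acc = acc.reverse ++ PySem.Chars.splitlines.go pvB l cur [] := by
  intro n
  induction n with
  | zero =>
    intro l hl cur acc
    have : l = [] := List.length_eq_zero_iff.mp (Nat.le_zero.mp hl)
    subst this
    rw [pv_go_nil, pv_go_nil]
    split_ifs <;> simp
  | succ n ih =>
    intro l hl cur acc
    match l with
    | [] =>
      rw [pv_go_nil, pv_go_nil]
      split_ifs <;> simp
    | '\r' :: '\n' :: rest =>
      rw [pv_go_crnl, pv_go_crnl]
      rw [ih rest (by simp at hl; omega) [] (cur.reverse :: acc),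
          ih rest (by simp at hl; omega) [] [cur.reverse]]
      simp
    | c :: rest =>
      by_cases h2 : c = '\r' ∧ ∃ r, rest = '\n' :: r
      · obtain ⟨rfl, r, rfl⟩ := h2
        rw [pv_go_crnl, pv_go_crnl]
        rw [ih r (by simp at hl ⊢; omega) [] (cur.reverse :: acc),
            ih r (by simp at hl ⊢; omega) [] [cur.reverse]]
        simp
      · rw [pv_go_cons c rest cur acc h2, pv_go_cons c rest cur [] h2]
        have hr : rest.length ≤ n := by simp at hl; omega
        split_ifs with hb
        · rw [ih rest hr [] (cur.reverse :: acc), ih rest hr [] [cur.reverse]]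
          simp
        · exact ih rest hr (c :: cur) acc

-- prepending a (nonempty) piece to the first line
def pvGlue (p : List Char) : List (List Char) → List (List Char)
  | [] => [p]
  | h :: t => (p ++ h) :: t

theorem pv_glue_glue (p q : List Char) (ls : List (List Char)) :
    pvGlue (p ++ q) ls = pvGlue p (pvGlue q ls) := by
  cases ls <;> simp [pvGlue]

theorem pv_go_cur : ∀ (n : Nat) (l : List Char), l.length ≤ n → ∀ cur, cur ≠ [] →
    PySem.Chars.splitlines.go pvB l cur [] =
      pvGlue cur.reverse (PySem.Chars.splitlines.go pvB l [] []) := by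
  intro n
  induction n with
  | zero =>
    intro l hl cur hcur
    have : l = [] := List.length_eq_zero_iff.mp (Nat.le_zero.mp hl)
    subst this
    rw [pv_go_nil, pv_go_nil]
    simp [hcur, pvGlue]
  | succ n ih =>
    intro l hl cur hcur
    match l with
    | [] =>
      rw [pv_go_nil, pv_go_nil]
      simp [hcur, pvGlue]
    | '\r' :: '\n' :: rest =>
      rw [pv_go_crnl, pv_go_crnl]
      simp only [List.reverse_nil]
      have hr : rest.length ≤ n := by simp at hl; omega
      rw [pv_go_acc (n := rest.length) rest le_rfl [] [cur.reverse],
          pv_go_acc (n := rest.length) rest le_rfl [] [[]]]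
      simp [pvGlue]
    | c :: rest =>
      by_cases h2 : c = '\r' ∧ ∃ r, rest = '\n' :: r
      · obtain ⟨rfl, r, rfl⟩ := h2
        rw [pv_go_crnl, pv_go_crnl]
        simp only [List.reverse_nil]
        rw [pv_go_acc (n := r.length) r le_rfl [] [cur.reverse],
            pv_go_acc (n := r.length) r le_rfl [] [[]]]
        simp [pvGlue]
      · rw [pv_go_cons c rest cur [] h2, pv_go_cons c rest [] [] h2]
        have hr : rest.length ≤ n := by simp at hl; omega
        split_ifs with hb
        · simp only [List.reverse_nil]
          rw [pv_go_acc (n := rest.length) rest le_rfl [] [cur.reverse],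
              pv_go_acc (n := rest.length) rest le_rfl [] [[]]]
          simp [pvGlue]
        · rw [ih rest hr (c :: cur) (by simp), ih rest hr [c] (by simp)]
          have : (c :: cur).reverse = cur.reverse ++ [c] := by simp
          rw [this, pv_glue_glue]
          rfl

theorem pv_splitlines_cons_nonbreak (c : Char) (rest : List Char) (h : pvB c = false) :
    PySem.Chars.splitlines (c :: rest) = pvGlue [c] (PySem.Chars.splitlines rest) := by
  have hc : ¬(c = '\r' ∧ ∃ r, rest = '\n' :: r) := by
    rintro ⟨rfl, -⟩
    simp [pvB] at h
  rw [pv_splitlines_eq, pv_splitlines_eq, pv_go_cons c rest [] [] hc, if_neg (by rw [h]; simp)]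
  exact pv_go_cur rest.length rest le_rfl [c] (by simp)

theorem pv_splitlines_skip (c : Char) (rest : List Char) (hb : pvB c = true)
    (h2 : ¬(c = '\r' ∧ ∃ r, rest = '\n' :: r)) :
    PySem.Chars.splitlines (c :: rest) = [] :: PySem.Chars.splitlines rest := by
  rw [pv_splitlines_eq, pv_splitlines_eq, pv_go_cons c rest [] [] h2, if_pos hb]
  simp only [List.reverse_nil]
  rw [pv_go_acc rest.length rest le_rfl [] [[]]]
  rfl

theorem pv_splitlines_crnl (rest : List Char) :
    PySem.Chars.splitlines ('\r' :: '\n' :: rest) = [] :: PySem.Chars.splitlines rest := by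
  rw [pv_splitlines_eq, pv_splitlines_eq, pv_go_crnl]
  simp only [List.reverse_nil]
  rw [pv_go_acc rest.length rest le_rfl [] [[]]]
  rfl

-- first line of splitlines on a non-break head
theorem pv_splitlines_head : ∀ (n : Nat) (rest : List Char), rest.length ≤ n → ∀ (c : Char), pvB c = false →
    ∃ t, PySem.Chars.splitlines (c :: rest) =
      (c :: rest.takeWhile (fun x => !pvB x)) :: t := by
  intro n
  induction n with
  | zero =>
    intro rest hl c hc
    have : rest = [] := List.length_eq_zero_iff.mp (Nat.le_zero.mp hl)
    subst this
    refine ⟨[], ?_⟩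
    rw [pv_splitlines_cons_nonbreak c [] hc]
    rfl
  | succ n ih =>
    intro rest hl c hc
    rw [pv_splitlines_cons_nonbreak c rest hc]
    match rest with
    | [] => exact ⟨[], rfl⟩
    | d :: r =>
      have hr : r.length ≤ n := by simp at hl; omega
      cases hd : pvB d with
      | true =>
        by_cases h2 : d = '\r' ∧ ∃ r', r = '\n' :: r'
        · obtain ⟨rfl, r', rfl⟩ := h2
          rw [pv_splitlines_crnl]
          refine ⟨PySem.Chars.splitlines r', ?_⟩
          simp [pvGlue, hd]
        · rw [pv_splitlines_skip d r hd h2]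
          refine ⟨PySem.Chars.splitlines r, ?_⟩
          simp [pvGlue, hd]
      | false =>
        obtain ⟨t, ht⟩ := ih r hr d hd
        rw [ht]
        refine ⟨t, ?_⟩
        simp [pvGlue, hd]

-- skipping a leading whitespace char of the first line does not change A's loop
theorem pv_loopA_glue_space (c : Char) (hs : PySem.Chars.isspace c = true) (ls : List (List Char)) :
    pvLoopA (pvGlue [c] ls) = pvLoopA ls := by
  cases ls with
  | nil =>
    simp [pvGlue, pvLoopA, PySem.Chars.strip, PySem.Chars.lstrip, List.dropWhile, hs,
      PySem.Chars.rstrip, PySem.Chars.lower]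
  | cons h t =>
    have hstr : PySem.Chars.strip (c :: h) = PySem.Chars.strip h := by
      simp [PySem.Chars.strip, PySem.Chars.lstrip, List.dropWhile, hs]
    simp only [pvGlue, List.singleton_append, pvLoopA, hstr]

-- pvTakeLine after lower = lower after takeWhile-non-break (dom chars)
theorem pv_takeline_lower (l : List Char) (h : ∀ c ∈ l, pvDomChar c = true) :
    pvTakeLine (PySem.Chars.lower l) = PySem.Chars.lower (l.takeWhile fun x => !pvB x) := by
  induction l with
  | nil => rfl
  | cons c rest ih =>
    have hc := h c (by simp)
    have hrest : ∀ x ∈ rest, pvDomChar x = true := fun x hx => h x (by simp [hx])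
    simp only [PySem.Chars.lower, List.map_cons, pvTakeLine, List.takeWhile_cons]
    by_cases hbr : c = '\r' ∨ c = '\n'
    · rw [if_pos ((pv_lower_break c).mpr hbr)]
      have hbc : pvB c = true := by
        rw [pvB_dom c hc]
        rcases hbr with h | h <;> simp [h]
      rw [hbc]
      rfl
    · rw [if_neg (fun hx => hbr ((pv_lower_break c).mp hx))]
      have hbc : pvB c = false := by
        rw [pvB_dom c hc]
        simp only [not_or] at hbr
        simp [hbr.1, hbr.2]
      rw [hbc]
      simp only [Bool.not_false, if_true, List.map_cons]
      exact congrArg (PySem.Chars.lowerChar c :: ·) (ih hrest)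

-- lower commutes with rstrip
theorem pv_lower_rstrip (l : List Char) :
    PySem.Chars.lower (PySem.Chars.rstrip l) = PySem.Chars.rstrip (PySem.Chars.lower l) := by
  have hpred : (PySem.Chars.isspace ∘ PySem.Chars.lowerChar) = PySem.Chars.isspace :=
    funext fun c => pv_isspace_lower c
  simp only [PySem.Chars.rstrip, PySem.Chars.lower, ← List.map_reverse, List.dropWhile_map, hpred]

theorem pv_rstrip_ne_nil (c : Char) (l : List Char) (h : PySem.Chars.isspace c = false) :
    PySem.Chars.rstrip (c :: l) ≠ [] := by
  intro hx
  simp only [PySem.Chars.rstrip, List.reverse_eq_nil_iff, List.dropWhile_eq_nil_iff,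
    List.reverse_cons] at hx
  have := hx c (by simp)
  rw [h] at this
  cases this

-- A's loop on a nonempty normalized first line is exactly B's classifier
theorem pv_loopA_classify (line : List Char) (t : List (List Char))
    (hne : PySem.Chars.lower (PySem.Chars.strip line) ≠ []) :
    pvLoopA (line :: t) = pvClassify (PySem.Chars.lower (PySem.Chars.strip line)) := by
  simp only [pvLoopA, pvClassify, if_neg hne]

-- the key equivalence, by strong induction on the text
theorem pv_key : ∀ (n : Nat) (l : List Char), l.length ≤ n → (∀ c ∈ l, pvDomChar c = true) →
    pvLoopA (PySem.Chars.splitlines l) =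
      pvClassify (PySem.Chars.rstrip (pvTakeLine (PySem.Chars.lstrip (PySem.Chars.lower l)))) := by
  intro n
  induction n with
  | zero =>
    intro l hl _
    have : l = [] := List.length_eq_zero_iff.mp (Nat.le_zero.mp hl)
    subst this
    rfl
  | succ n ih =>
    intro l hl hdom
    match l with
    | [] => rfl
    | c :: rest =>
      have hc := hdom c (by simp)
      have hrest : ∀ x ∈ rest, pvDomChar x = true := fun x hx => hdom x (by simp [hx])
      by_cases hsp : PySem.Chars.isspace c = true
      · -- whitespace head: both sides reduce to the tail
        have hBstep : PySem.Chars.lstrip (PySem.Chars.lower (c :: rest)) =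
            PySem.Chars.lstrip (PySem.Chars.lower rest) := by
          simp [PySem.Chars.lower, PySem.Chars.lstrip, pv_isspace_lower, hsp]
        rw [hBstep]
        cases hb : pvB c with
        | false =>
          rw [pv_splitlines_cons_nonbreak c rest hb, pv_loopA_glue_space c hsp]
          exact ih rest (by simp at hl; omega) hrest
        | true =>
          by_cases h2 : c = '\r' ∧ ∃ r, rest = '\n' :: r
          · obtain ⟨rfl, r, rfl⟩ := h2
            rw [pv_splitlines_crnl]
            have hr : ∀ x ∈ r, pvDomChar x = true := fun x hx => hrest x (by simp [hx])
            have hstep2 : PySem.Chars.lstrip (PySem.Chars.lower ('\n' :: r)) =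
                PySem.Chars.lstrip (PySem.Chars.lower r) := by
              simp [PySem.Chars.lower, PySem.Chars.lstrip, List.dropWhile, pv_isspace_lower]
              rfl
            rw [show pvLoopA ([] :: PySem.Chars.splitlines r) = pvLoopA (PySem.Chars.splitlines r) from by
              simp [pvLoopA, PySem.Chars.strip, PySem.Chars.lstrip, PySem.Chars.rstrip, PySem.Chars.lower]]
            rw [hstep2]
            exact ih r (by simp at hl; omega) hr
          · rw [pv_splitlines_skip c rest hb h2]
            rw [show pvLoopA ([] :: PySem.Chars.splitlines rest) = pvLoopA (PySem.Chars.splitlines rest) from by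
              simp [pvLoopA, PySem.Chars.strip, PySem.Chars.lstrip, PySem.Chars.rstrip, PySem.Chars.lower]]
            exact ih rest (by simp at hl; omega) hrest
      · -- non-whitespace head: both sides classify the same first line; no recursion
        have hsp' : PySem.Chars.isspace c = false := by
          cases hx : PySem.Chars.isspace c
          · rfl
          · exact absurd hx hsp
        have hb : pvB c = false := pv_nonspace_pvB c hc hsp'
        obtain ⟨t, ht⟩ := pv_splitlines_head rest.length rest le_rfl c hb
        rw [ht]
        set tw := rest.takeWhile (fun x => !pvB x) with htw
        -- A's normalized first line
        have hlstrip : PySem.Chars.lstrip (c :: tw) = c :: tw := by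
          simp [PySem.Chars.lstrip, List.dropWhile, hsp']
        have hnorm : PySem.Chars.lower (PySem.Chars.strip (c :: tw)) =
            PySem.Chars.rstrip (PySem.Chars.lower (c :: tw)) := by
          rw [PySem.Chars.strip, hlstrip, pv_lower_rstrip]
        have hne : PySem.Chars.lower (PySem.Chars.strip (c :: tw)) ≠ [] := by
          rw [hnorm]
          intro hx
          have hlc : PySem.Chars.isspace (PySem.Chars.lowerChar c) = false := by
            rw [pv_isspace_lower]; exact hsp'
          exact pv_rstrip_ne_nil (PySem.Chars.lowerChar c) (PySem.Chars.lower tw) hlc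
            (by simpa [PySem.Chars.lower] using hx)
        rw [pv_loopA_classify _ t hne, hnorm]
        -- B's first line
        have hlc : PySem.Chars.isspace (PySem.Chars.lowerChar c) = false := by
          rw [pv_isspace_lower]; exact hsp'
        have hBl : PySem.Chars.lstrip (PySem.Chars.lower (c :: rest)) =
            PySem.Chars.lowerChar c :: PySem.Chars.lower rest := by
          simp [PySem.Chars.lower, PySem.Chars.lstrip, hlc]
        rw [hBl]
        have hcnb : ¬(PySem.Chars.lowerChar c = '\r' ∨ PySem.Chars.lowerChar c = '\n') := by
          intro hx
          have := (pv_lower_break c).mp hx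
          have : pvB c = true := by
            rw [pvB_dom c hc]; simp; tauto
          rw [hb] at this; cases this
        have hTL : pvTakeLine (PySem.Chars.lowerChar c :: PySem.Chars.lower rest) =
            PySem.Chars.lowerChar c :: PySem.Chars.lower tw := by
          simp only [pvTakeLine, if_neg hcnb]
          rw [pv_takeline_lower rest hrest]
        rw [hTL]
        have : (PySem.Chars.lowerChar c :: PySem.Chars.lower tw) = PySem.Chars.lower (c :: tw) := by
          simp [PySem.Chars.lower]
        rw [this]

-- ===== VERDICT (by name: the statement is the Claim_ definition above) =====
theorem parse_review_verdict_spec : Claim_equal_parse_review_verdict := by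
  intro s hdom
  unfold Spec_parse_review_verdict parse_review_verdict parse_review_verdict_alt
  exact pv_key s.toList.length s.toList le_rfl
    (by simpa [pvDomStr, List.all_eq_true, Dom_parse_review_verdict] using hdom)
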